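-- pv_equiv track=rewrite | github.com/MrBrantCode/unitest_baseline | mut_generate/mist_train_taco/taco_19185/solution.py | count_almost_identity_permutations
-- ===== SOURCE A (Python) =====
-- def calculate_derangement(fac, n):
--     ans = fac[n]
--     for i in range(1, n + 1):
--         if i % 2 == 1:
--             ans -= fac[n] // fac[i]
--         else:
--             ans += fac[n] // fac[i]
--     return ans
--
-- def count_almost_identity_permutations(n, k):
--     fac = [1]
--     for i in range(1, n + 1):
--         fac.append(fac[i - 1] * i)
--
--     ans = 0
--     for i in range(0, k + 1):
--         choose = fac[n]
--         choose //= fac[i]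
--         choose //= fac[n - i]
--         ans += choose * calculate_derangement(fac, i)
--
--     return ans
-- ===== SOURCE B (Python) =====
-- def count_almost_identity_permutations(n, k):
--     if k < 0:
--         return 0
--     ans = 1  # i = 0 term: C(n,0) * D(0) = 1
--     choose, der, sign = 1, 1, 1
--     for i in range(1, k + 1):
--         choose = choose * (n - i + 1) // i
--         sign = -sign
--         der = i * der + sign
--         ans += choose * der
--     return ans
-- ===== Notes on version B (the rewrite author's own statement) =====
-- stated objective: faster
-- what changed: B drops A's factorial table, exact-division binomials and inner alternating-sum derangement loop, maintaining C(n,i) and the derangement number D(i) by their multiplicative recurrences in a single O(k) loop.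
-- outside the precondition, e.g. on count_almost_identity_permutations(-2, 0): A raises IndexError, B returns 1
import Mathlib
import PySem

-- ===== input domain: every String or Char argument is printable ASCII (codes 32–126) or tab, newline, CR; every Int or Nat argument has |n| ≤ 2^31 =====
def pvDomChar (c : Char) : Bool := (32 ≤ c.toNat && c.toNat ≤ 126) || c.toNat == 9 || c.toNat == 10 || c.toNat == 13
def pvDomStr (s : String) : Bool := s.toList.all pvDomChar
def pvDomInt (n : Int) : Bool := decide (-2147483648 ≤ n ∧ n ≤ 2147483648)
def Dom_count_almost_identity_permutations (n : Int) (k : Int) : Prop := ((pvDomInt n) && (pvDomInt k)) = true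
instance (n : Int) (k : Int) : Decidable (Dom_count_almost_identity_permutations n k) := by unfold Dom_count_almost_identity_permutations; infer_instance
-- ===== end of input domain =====

-- B replaces A's factorial table, exact-division binomials and inner alternating-sum loop by one O(k) loop
-- maintaining C(n,i) and the derangement number by their multiplicative recurrences (faster, asymptotically).

-- ===== PORT A =====
-- port of calculate_derangement(fac, n)
def pvCalcDer (fac : List Int) (n : Int) : Int :=
  (PySem.List.pyRange 1 (n + 1) 1).foldl
    (fun ans i =>
      if PySem.Int.mod i 2 = 1 then
        ans - PySem.Int.floordiv (PySem.List.pyGetD fac n 0) (PySem.List.pyGetD fac i 0)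
      else
        ans + PySem.Int.floordiv (PySem.List.pyGetD fac n 0) (PySem.List.pyGetD fac i 0))
    (PySem.List.pyGetD fac n 0)

def count_almost_identity_permutations (n : Int) (k : Int) : Int :=
  let fac := (PySem.List.pyRange 1 (n + 1) 1).foldl
    (fun f i => f ++ [PySem.List.pyGetD f (i - 1) 0 * i]) [1]
  (PySem.List.pyRange 0 (k + 1) 1).foldl
    (fun ans i =>
      let choose := PySem.List.pyGetD fac n 0
      let choose := PySem.Int.floordiv choose (PySem.List.pyGetD fac i 0)
      let choose := PySem.Int.floordiv choose (PySem.List.pyGetD fac (n - i) 0)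
      ans + choose * pvCalcDer fac i) 0

-- ===== PORT B =====
def count_almost_identity_permutations_alt (n : Int) (k : Int) : Int :=
  if k < 0 then 0
  else
    ((PySem.List.pyRange 1 (k + 1) 1).foldl
      (fun (st : Int × Int × Int × Int) i =>
        let choose := PySem.Int.floordiv (st.2.1 * (n - i + 1)) i
        let sign := -st.2.2.2
        let der := i * st.2.2.1 + sign
        (st.1 + choose * der, choose, der, sign))
      (1, 1, 1, 1)).1

-- ===== PRECONDITION & SPEC =====
-- Pre_ admits exactly the inputs on which A returns (k < 0 returns 0; 0 ≤ k ≤ n is the normal case;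
-- (n, k) = (-1, 0) returns via negative-index wraparound); elsewhere A raises IndexError.
def Pre_count_almost_identity_permutations (n : Int) (k : Int) : Prop :=
  k < 0 ∨ (0 ≤ k ∧ k ≤ n) ∨ (n = -1 ∧ k = 0)
instance (n : Int) (k : Int) : Decidable (Pre_count_almost_identity_permutations n k) := by
  unfold Pre_count_almost_identity_permutations; infer_instance

def pvWitness_count_almost_identity_permutations : Int × Int := (4, 2)

def Spec_count_almost_identity_permutations (n : Int) (k : Int) (out : Int) : Prop := out = count_almost_identity_permutations_alt n k
instance (n : Int) (k : Int) (out : Int) : Decidable (Spec_count_almost_identity_permutations n k out) := by unfold Spec_count_almost_identity_permutations; infer_instance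

-- ===== CLAIM (what is proved, stated in full; the proofs are below) =====
def Claim_equal_count_almost_identity_permutations : Prop := ∀ (n : Int) (k : Int), Dom_count_almost_identity_permutations n k → Pre_count_almost_identity_permutations n k → Spec_count_almost_identity_permutations n k (count_almost_identity_permutations n k)

-- ===== LEMMAS AND PROOFS =====

def pvDer : Nat → Int
  | 0 => 1
  | m + 1 => (m + 1) * pvDer m + (-1) ^ (m + 1)

def pvSum (N K : Nat) : Int :=
  ((List.range (K + 1)).map (fun i => (N.choose i : Int) * pvDer i)).sum

def pvFacList (N : Nat) : List Int := (List.range (N + 1)).map (fun j => (j.factorial : Int))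

def pvG (I j : Nat) : Int :=
  if j % 2 = 1 then -((I.factorial / j.factorial : Nat) : Int)
  else ((I.factorial / j.factorial : Nat) : Int)

lemma pvFac_getD (N j : Nat) (h : j ≤ N) :
    PySem.List.pyGetD (pvFacList N) (j : Int) 0 = (j.factorial : Int) := by
  rw [pvFacList, PySem.List.pyGetD_natCast]
  rw [List.getD_eq_getElem?_getD, List.getElem?_map, List.getElem?_range (by omega)]
  rfl

lemma pvFac_eq (N : Nat) :
    (PySem.List.pyRange 1 ((N : Int) + 1) 1).foldl
      (fun f i => f ++ [PySem.List.pyGetD f (i - 1) 0 * i]) [1] = pvFacList N := by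
  induction N with
  | zero => rw [PySem.List.pyRange_one_eq_nil (by omega)]; rfl
  | succ m ih =>
    have : ((m + 1 : Nat) : Int) + 1 = ((m : Int) + 1) + 1 := by push_cast; ring
    rw [this, PySem.List.pyRange_one_succ_right (by omega), List.foldl_append, ih]
    have hidx : ((m : Int) + 1 - 1) = (m : Int) := by ring
    rw [List.foldl_cons, List.foldl_nil, hidx, pvFac_getD m m le_rfl]
    have hf : (m.factorial : Int) * ((m : Int) + 1) = ((m + 1).factorial : Int) := by
      push_cast [Nat.factorial_succ]; ring
    rw [hf]
    show pvFacList m ++ [((m + 1).factorial : Int)] = pvFacList (m + 1)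
    simp [pvFacList, List.range_succ]

lemma pvNegOnePow (m : Nat) : ((-1 : Int)) ^ m = if m % 2 = 1 then -1 else 1 := by
  rcases Nat.even_or_odd m with he | ho
  · rw [he.neg_one_pow, if_neg (by rw [Nat.even_iff] at he; omega)]
  · rw [ho.neg_one_pow, if_pos (by rw [Nat.odd_iff] at ho; omega)]

lemma pvDivSucc (I j : Nat) (h : j ≤ I) :
    (I + 1).factorial / j.factorial = (I + 1) * (I.factorial / j.factorial) := by
  rw [Nat.factorial_succ, Nat.mul_div_assoc (I + 1) (Nat.factorial_dvd_factorial h)]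

lemma pvS_eq_der (I : Nat) :
    (I.factorial : Int) + ((List.range I).map (fun k => pvG I (k + 1))).sum = pvDer I := by
  induction I with
  | zero => simp [pvDer]
  | succ m ih =>
    have hlast : pvG (m + 1) (m + 1) = (-1 : Int) ^ (m + 1) := by
      rw [pvG, Nat.div_self (Nat.factorial_pos (m + 1)), pvNegOnePow]
      split_ifs <;> simp
    have hterm : ∀ k ∈ List.range m, pvG (m + 1) (k + 1) = ((m : Int) + 1) * pvG m (k + 1) := by
      intro k hk
      have hk' : k + 1 ≤ m := by simpa using List.mem_range.mp hk
      rw [pvG, pvG, pvDivSucc m (k + 1) hk']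
      split_ifs <;> push_cast <;> ring
    rw [List.range_succ, List.map_append, List.sum_append, List.map_congr_left hterm]
    simp only [List.map_cons, List.map_nil, List.sum_cons, List.sum_nil, hlast]
    have : ((List.range m).map (fun k => ((m : Int) + 1) * pvG m (k + 1))).sum
        = ((m : Int) + 1) * ((List.range m).map (fun k => pvG m (k + 1))).sum := by
      simp [List.sum_map_mul_left]
    rw [this]
    have hfac : ((m + 1).factorial : Int) = ((m : Int) + 1) * (m.factorial : Int) := by
      push_cast [Nat.factorial_succ]; ring
    rw [hfac, pvDer, ← ih]
    ring

lemma pvCalcDer_eq (N I : Nat) (h : I ≤ N) :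
    pvCalcDer (pvFacList N) (I : Int) = pvDer I := by
  rw [pvCalcDer]
  have hbody : (fun (ans i : Int) =>
      if PySem.Int.mod i 2 = 1 then
        ans - PySem.Int.floordiv (PySem.List.pyGetD (pvFacList N) (I : Int) 0) (PySem.List.pyGetD (pvFacList N) i 0)
      else
        ans + PySem.Int.floordiv (PySem.List.pyGetD (pvFacList N) (I : Int) 0) (PySem.List.pyGetD (pvFacList N) i 0))
      = (fun (ans i : Int) => ans +
          (if PySem.Int.mod i 2 = 1 then
            -(PySem.Int.floordiv (PySem.List.pyGetD (pvFacList N) (I : Int) 0) (PySem.List.pyGetD (pvFacList N) i 0))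
          else
            PySem.Int.floordiv (PySem.List.pyGetD (pvFacList N) (I : Int) 0) (PySem.List.pyGetD (pvFacList N) i 0))) := by
    funext a i; split_ifs <;> ring
  rw [hbody, PySem.List.foldl_add, pvFac_getD N I h]
  have hrange : PySem.List.pyRange 1 ((I : Int) + 1) 1
      = (List.range I).map (fun k => (1 : Int) + (k : Nat)) := by
    rw [PySem.List.pyRange_one]
    have : ((I : Int) + 1 - 1).toNat = I := by omega
    rw [this]
  rw [hrange, List.map_map]
  rw [← pvS_eq_der I]
  congr 1
  congr 1
  apply List.map_congr_left
  intro k hk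
  have hk' : k < I := List.mem_range.mp hk
  have hcast : (1 : Int) + (k : Nat) = ((k + 1 : Nat) : Int) := by push_cast; ring
  simp only [Function.comp_apply, hcast]
  rw [pvFac_getD N (k + 1) (by omega), pvG]
  have hmod : PySem.Int.mod (((k + 1 : Nat)) : Int) 2 = (((k + 1) % 2 : Nat) : Int) := by
    exact_mod_cast PySem.Int.mod_natCast (k + 1) 2
  rw [hmod, PySem.Int.floordiv_natCast]
  have : (((k + 1) % 2 : Nat) : Int) = 1 ↔ (k + 1) % 2 = 1 := by omega
  split_ifs with h1 h2 h3
  · rfl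
  · exact absurd (this.mp h1) h2
  · exact absurd (this.mpr h3) h1
  · rfl

lemma pvChooseDiv (N i : Nat) (h : i ≤ N) :
    N.factorial / i.factorial / (N - i).factorial = N.choose i := by
  have h1 : N.factorial = (N.choose i * (N - i).factorial) * i.factorial := by
    rw [← Nat.choose_mul_factorial_mul_factorial h]; ring
  rw [h1, Nat.mul_div_cancel _ (Nat.factorial_pos i), Nat.mul_div_cancel _ (Nat.factorial_pos _)]

lemma pvA_eq (N K : Nat) (h : K ≤ N) :
    count_almost_identity_permutations (N : Int) (K : Int) = pvSum N K := by
  have hA : count_almost_identity_permutations (N : Int) (K : Int)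
      = (PySem.List.pyRange 0 ((K : Int) + 1) 1).foldl
          (fun ans i => ans +
            PySem.Int.floordiv
              (PySem.Int.floordiv (PySem.List.pyGetD (pvFacList N) (N : Int) 0)
                (PySem.List.pyGetD (pvFacList N) i 0))
              (PySem.List.pyGetD (pvFacList N) ((N : Int) - i) 0)
            * pvCalcDer (pvFacList N) i) 0 := by
    unfold count_almost_identity_permutations
    rw [pvFac_eq N]
  rw [hA, PySem.List.foldl_add]
  have hrange : PySem.List.pyRange 0 ((K : Int) + 1) 1
      = (List.range (K + 1)).map (fun k => (0 : Int) + (k : Nat)) := by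
    rw [PySem.List.pyRange_one]
    have : ((K : Int) + 1 - 0).toNat = K + 1 := by omega
    rw [this]
  rw [hrange, List.map_map, zero_add]
  rw [pvSum]
  congr 1
  apply List.map_congr_left
  intro k hk
  have hk' : k ≤ K := by have := List.mem_range.mp hk; omega
  have hkN : k ≤ N := le_trans hk' h
  have hcast : (0 : Int) + (k : Nat) = ((k : Nat) : Int) := by ring
  simp only [Function.comp_apply, hcast]
  rw [pvFac_getD N N le_rfl, pvFac_getD N k hkN]
  have hsub : (N : Int) - (k : Nat) = ((N - k : Nat) : Int) := by omega
  rw [hsub, pvFac_getD N (N - k) (by omega)]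
  rw [PySem.Int.floordiv_natCast, PySem.Int.floordiv_natCast]
  rw [pvChooseDiv N k hkN, pvCalcDer_eq N k hkN]

lemma pvB_loop (N K : Nat) (h : K ≤ N) :
    (PySem.List.pyRange 1 ((K : Int) + 1) 1).foldl
      (fun (st : Int × Int × Int × Int) i =>
        let choose := PySem.Int.floordiv (st.2.1 * ((N : Int) - i + 1)) i
        let sign := -st.2.2.2
        let der := i * st.2.2.1 + sign
        (st.1 + choose * der, choose, der, sign))
      (1, 1, 1, 1)
    = (pvSum N K, (N.choose K : Int), pvDer K, (-1) ^ K) := by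
  induction K with
  | zero =>
    rw [PySem.List.pyRange_one_eq_nil (by norm_num)]
    simp [pvSum, pvDer]
  | succ m ih =>
    have hm : m ≤ N := by omega
    have hcast : ((m + 1 : Nat) : Int) + 1 = ((m : Int) + 1) + 1 := by push_cast; ring
    rw [hcast, PySem.List.pyRange_one_succ_right (by omega), List.foldl_append, ih hm,
      List.foldl_cons, List.foldl_nil]
    have hC : PySem.Int.floordiv ((N.choose m : Int) * ((N : Int) - ((m : Int) + 1) + 1)) ((m : Int) + 1)
        = (N.choose (m + 1) : Int) := by
      have h1 : (N : Int) - ((m : Int) + 1) + 1 = ((N - m : Nat) : Int) := by omega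
      have h2 : (N.choose m : Int) * ((N - m : Nat) : Int) = ((N.choose m * (N - m) : Nat) : Int) := by
        push_cast; ring
      have h3 : ((m : Int) + 1) = ((m + 1 : Nat) : Int) := by push_cast; ring
      rw [h1, h2, h3, PySem.Int.floordiv_natCast]
      rw [← Nat.choose_succ_right_eq, Nat.mul_div_cancel _ (by omega)]
    have hS : -((-1 : Int) ^ m) = (-1 : Int) ^ (m + 1) := by rw [pow_succ]; ring
    have hD : ((m : Int) + 1) * pvDer m + (-1 : Int) ^ (m + 1) = pvDer (m + 1) := by
      rw [pvDer]
    show (pvSum N m + _ * _, _, _, _) = _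
    rw [hC, hS, hD]
    have hAns : pvSum N (m + 1) = pvSum N m + (N.choose (m + 1) : Int) * pvDer (m + 1) := by
      rw [pvSum]
      conv_lhs => rw [List.range_succ]
      rw [List.map_append, List.sum_append, ← pvSum]
      simp
    rw [hAns]

lemma pvB_eq (N K : Nat) (h : K ≤ N) :
    count_almost_identity_permutations_alt (N : Int) (K : Int) = pvSum N K := by
  unfold count_almost_identity_permutations_alt
  rw [if_neg (by omega), pvB_loop N K h]

-- ===== VERDICT (by name: the statement is the Claim_ definition above) =====
theorem count_almost_identity_permutations_spec : Claim_equal_count_almost_identity_permutations := by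
  intro n k _ hpre
  unfold Spec_count_almost_identity_permutations
  rcases hpre with hk | ⟨hk0, hkn⟩ | ⟨hn, hk⟩
  · -- k < 0 : both loops are empty
    unfold count_almost_identity_permutations count_almost_identity_permutations_alt
    rw [show PySem.List.pyRange 0 (k + 1) 1 = [] from PySem.List.pyRange_one_eq_nil (by omega)]
    simp [hk]
  · -- 0 ≤ k ≤ n
    obtain ⟨K, rfl⟩ : ∃ K : Nat, k = (K : Int) := ⟨k.toNat, (Int.toNat_of_nonneg hk0).symm⟩
    obtain ⟨N, rfl⟩ : ∃ N : Nat, n = (N : Int) := ⟨n.toNat, (Int.toNat_of_nonneg (le_trans hk0 hkn)).symm⟩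
    have h : K ≤ N := by exact_mod_cast hkn
    rw [pvA_eq N K h, pvB_eq N K h]
  · subst hn; subst hk; decide
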